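-- pv_equiv track=rewrite | github.com/kirilenkobm/CURIA_pipeline | modules/utils/ultimate_isoforms.py | _pick_biotype
-- ===== SOURCE A (Python) =====
-- from typing import Dict, List, Tuple
--
-- def _pick_biotype(biotypes: List[str]) -> str:
--     for b in biotypes:
--         if b is None:
--             continue
--         b_norm = b.strip().lower().replace("-", "_").replace(" ", "_")
--         if b_norm == "protein_coding":
--             return "protein_coding"
--     for b in biotypes:
--         if b:
--             return b
--     return "unknown"
-- ===== SOURCE B (Python) =====
-- def _pick_biotype(biotypes):
--     first_truthy = None
--     for b in biotypes:
--         if b is None: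
--             continue
--         b_norm = b.strip().lower().replace("-", "_").replace(" ", "_")
--         if b_norm == "protein_coding":
--             return "protein_coding"
--         if first_truthy is None and b:
--             first_truthy = b
--     return first_truthy if first_truthy is not None else "unknown"
-- ===== Notes on version B (the rewrite author's own statement) =====
-- stated objective: simpler
-- what changed: Single pass that returns immediately on a protein_coding match and remembers the first truthy biotype, instead of two separate scans over the list.
import Mathlib
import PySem

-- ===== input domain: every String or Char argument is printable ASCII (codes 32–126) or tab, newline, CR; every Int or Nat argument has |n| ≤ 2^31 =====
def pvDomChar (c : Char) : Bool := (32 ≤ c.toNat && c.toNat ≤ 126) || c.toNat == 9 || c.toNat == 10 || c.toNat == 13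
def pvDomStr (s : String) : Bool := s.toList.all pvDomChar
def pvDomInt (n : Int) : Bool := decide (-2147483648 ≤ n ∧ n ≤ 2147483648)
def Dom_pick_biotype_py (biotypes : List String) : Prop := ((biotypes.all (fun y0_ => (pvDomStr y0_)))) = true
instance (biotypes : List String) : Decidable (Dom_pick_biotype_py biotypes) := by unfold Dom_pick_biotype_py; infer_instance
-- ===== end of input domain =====

-- B does one pass (return on protein_coding match, remember the first truthy biotype) instead of A's two scans; objective: simpler.

-- ===== PORT A =====
-- b.strip().lower().replace("-", "_").replace(" ", "_")
def pvNorm (b : String) : String :=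
  PySem.Str.replace (PySem.Str.replace (PySem.Str.lower (PySem.Str.strip b)) "-" "_") " " "_"

-- first loop of A: returns some "protein_coding" if any normalized element matches
def pickLoop1 : List String → Option String
  | [] => none
  | b :: rest =>
    if pvNorm b = "protein_coding" then some "protein_coding" else pickLoop1 rest

-- second loop of A: first truthy (nonempty) element, else "unknown"
def pickLoop2 : List String → String
  | [] => "unknown"
  | b :: rest => if b ≠ "" then b else pickLoop2 rest

def pick_biotype_py (biotypes : List String) : String :=
  match pickLoop1 biotypes with
  | some s => s
  | none => pickLoop2 biotypes

-- ===== PORT B =====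
def pickOne : List String → Option String → String
  | [], first_truthy => first_truthy.getD "unknown"
  | b :: rest, first_truthy =>
    if pvNorm b = "protein_coding" then "protein_coding"
    else pickOne rest (if first_truthy.isNone && b ≠ "" then some b else first_truthy)

def pick_biotype_py_alt (biotypes : List String) : String := pickOne biotypes none

-- ===== PRECONDITION & SPEC =====
def Spec_pick_biotype_py (biotypes : List String) (out : String) : Prop := out = pick_biotype_py_alt biotypes
instance (biotypes : List String) (out : String) : Decidable (Spec_pick_biotype_py biotypes out) := by unfold Spec_pick_biotype_py; infer_instance

-- ===== CLAIM (what is proved, stated in full; the proofs are below) =====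
def Claim_equal_pick_biotype_py : Prop := ∀ (biotypes : List String), Dom_pick_biotype_py biotypes → Spec_pick_biotype_py biotypes (pick_biotype_py biotypes)

-- ===== LEMMAS AND PROOFS =====

-- When no element matches, the one-pass loop returns the remembered truthy value if any, else A's second scan.
theorem pickOne_none (bs : List String) : ∀ ft : Option String,
    pickLoop1 bs = none →
    pickOne bs ft = ft.getD (pickLoop2 bs) := by
  induction bs with
  | nil => intro ft _; rfl
  | cons b rest ih =>
    intro ft h
    simp only [pickLoop1] at h
    by_cases hn : pvNorm b = "protein_coding"
    · simp [hn] at h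
    · simp [pickOne, pickLoop2, hn] at h ⊢
      by_cases hb : b = ""
      · simp [hb, ih _ h]
      · cases ft with
        | none => simp [hb, ih _ h]
        | some s => simp [hb, ih _ h]

theorem pickOne_some (bs : List String) : ∀ ft : Option String,
    pickLoop1 bs = some "protein_coding" →
    pickOne bs ft = "protein_coding" := by
  induction bs with
  | nil => intro ft h; simp [pickLoop1] at h
  | cons b rest ih =>
    intro ft h
    simp only [pickLoop1] at h
    by_cases hn : pvNorm b = "protein_coding"
    · simp [pickOne, hn]
    · simp [hn] at h
      simp [pickOne, hn, ih _ h]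

theorem pickLoop1_shape (bs : List String) :
    pickLoop1 bs = none ∨ pickLoop1 bs = some "protein_coding" := by
  induction bs with
  | nil => left; rfl
  | cons b rest ih =>
    simp only [pickLoop1]
    by_cases hn : pvNorm b = "protein_coding" <;> simp [hn, ih]

-- ===== VERDICT (by name: the statement is the Claim_ definition above) =====
theorem pick_biotype_py_spec : Claim_equal_pick_biotype_py := by
  intro bs _
  unfold Spec_pick_biotype_py pick_biotype_py pick_biotype_py_alt
  rcases pickLoop1_shape bs with h | h
  · simp [h, pickOne_none bs none h]
  · simp [h, pickOne_some bs none h]
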